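-- pv_equiv track=rewrite | github.com/FiskAxel/advent_of_code_2016 | day14.py | getTriple
-- ===== SOURCE A (Python) =====
-- def getTriple(input):
-- 	prev = ""
-- 	streak = 0
-- 	for i in input:
-- 		if i == prev:
-- 			streak += 1
-- 		else:
-- 			streak = 1
-- 			prev = i
-- 			continue
-- 		if streak == 3:
-- 			return prev + prev + prev
-- 	return ""
-- ===== SOURCE B (Python) =====
-- def getTriple(input):
--     for i in range(len(input) - 2):
--         if input[i] == input[i + 1] == input[i + 2]:
--             return input[i] * 3
--     return ""
-- ===== Notes on version B (the rewrite author's own statement) =====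
-- stated objective: simpler
-- what changed: Replaced the prev/streak state machine with a direct index scan that tests each window input[i..i+2] for three equal consecutive characters.
import Mathlib
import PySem

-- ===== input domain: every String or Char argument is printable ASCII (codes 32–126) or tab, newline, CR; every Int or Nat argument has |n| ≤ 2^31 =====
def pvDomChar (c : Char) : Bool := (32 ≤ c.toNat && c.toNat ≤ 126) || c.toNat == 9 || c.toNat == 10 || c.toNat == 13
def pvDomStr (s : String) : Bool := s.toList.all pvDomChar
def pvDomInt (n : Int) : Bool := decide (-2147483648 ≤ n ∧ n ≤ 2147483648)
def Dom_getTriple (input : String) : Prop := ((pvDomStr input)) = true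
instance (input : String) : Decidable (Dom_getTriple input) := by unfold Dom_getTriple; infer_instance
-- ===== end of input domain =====

-- B replaces A's prev/streak state machine with a direct index scan over 3-char windows (simpler decomposition, same O(n)).


-- ===== PORT A =====
-- state machine: prev is Option Char ("" initially, never equal to a char), streak a counter
def getTripleGoA : List Char → Option Char → Nat → String
  | [], _, _ => ""
  | c :: rest, prev, streak =>
    if some c = prev then
      if streak + 1 = 3 then String.ofList [c, c, c]
      else getTripleGoA rest prev (streak + 1)
    else
      getTripleGoA rest (some c) 1

def getTriple (input : String) : String := getTripleGoA input.toList none 0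

-- ===== PORT B =====
-- for i in range(len(input)-2): test input[i] == input[i+1] == input[i+2]
def getTripleGoB (s : List Char) (i : Nat) : String :=
  if h : i + 2 < s.length then
    if s[i]'(by omega) = s[i + 1]'(by omega) ∧ s[i + 1]'(by omega) = s[i + 2] then
      String.ofList [s[i]'(by omega), s[i]'(by omega), s[i]'(by omega)]
    else getTripleGoB s (i + 1)
  else ""
termination_by s.length - i

def getTriple_alt (input : String) : String := getTripleGoB input.toList 0

-- ===== PRECONDITION & SPEC =====
def Spec_getTriple (input : String) (out : String) : Prop := out = getTriple_alt input
instance (input : String) (out : String) : Decidable (Spec_getTriple input out) := by unfold Spec_getTriple; infer_instance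

-- ===== CLAIM (what is proved, stated in full; the proofs are below) =====
def Claim_equal_getTriple : Prop := ∀ (input : String), Dom_getTriple input → Spec_getTriple input (getTriple input)

-- ===== LEMMAS AND PROOFS =====

-- proof-only helper: B's scan phrased as structural recursion over the window list
def getTripleGoW : List Char → String
  | a :: b :: c :: rest =>
    if a = b ∧ b = c then String.ofList [a, a, a] else getTripleGoW (b :: c :: rest)
  | _ => ""

lemma goW_drop_head {a b : Char} (l : List Char) (hne : a ≠ b) :
    getTripleGoW (a :: b :: l) = getTripleGoW (b :: l) := by
  cases l with
  | nil => rfl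
  | cons c rest =>
    simp only [getTripleGoW]
    rw [if_neg]
    rintro ⟨h, -⟩; exact hne h

lemma goB_eq_goW (s : List Char) (i : Nat) :
    getTripleGoB s i = getTripleGoW (s.drop i) := by
  by_cases h : i + 2 < s.length
  · have h0 : i < s.length := by omega
    have h1 : i + 1 < s.length := by omega
    have hd : s.drop i = s[i] :: s[i + 1] :: s[i + 2] :: s.drop (i + 3) := by
      rw [List.drop_eq_getElem_cons h0, List.drop_eq_getElem_cons h1,
          List.drop_eq_getElem_cons h]
    have hd1 : s.drop (i + 1) = s[i + 1] :: s[i + 2] :: s.drop (i + 3) := by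
      rw [List.drop_eq_getElem_cons h1, List.drop_eq_getElem_cons h]
    rw [getTripleGoB, dif_pos h, hd, getTripleGoW]
    by_cases heq : s[i] = s[i + 1] ∧ s[i + 1] = s[i + 2]
    · rw [if_pos heq, if_pos heq]
    · rw [if_neg heq, if_neg heq, goB_eq_goW s (i + 1), hd1]
  · rw [getTripleGoB, dif_neg h]
    have : s.drop i = [] ∨ ∃ a, s.drop i = [a] ∨ ∃ b, s.drop i = [a, b] := by
      have hlen : (s.drop i).length ≤ 2 := by simp [List.length_drop]; omega
      match hm : s.drop i with
      | [] => exact Or.inl rfl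
      | [a] => exact Or.inr ⟨a, Or.inl rfl⟩
      | [a, b] => exact Or.inr ⟨a, Or.inr ⟨b, rfl⟩⟩
      | a :: b :: c :: r => rw [hm] at hlen; simp at hlen
    rcases this with h' | ⟨a, h' | ⟨b, h'⟩⟩ <;> rw [h'] <;> rfl
termination_by s.length - i

lemma goA_eq_goW (l : List Char) : ∀ p : Char,
    getTripleGoA l (some p) 1 = getTripleGoW (p :: l) ∧
    getTripleGoA l (some p) 2 = getTripleGoW (p :: p :: l) := by
  induction l with
  | nil => intro p; exact ⟨rfl, rfl⟩
  | cons c rest ih =>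
    intro p
    constructor
    · by_cases hc : c = p
      · subst hc
        simp only [getTripleGoA]
        norm_num
        exact (ih c).2
      · simp only [getTripleGoA]
        rw [if_neg (by simpa using hc), goW_drop_head _ (fun h => hc h.symm)]
        exact (ih c).1
    · by_cases hc : c = p
      · subst hc
        simp only [getTripleGoA]
        norm_num [getTripleGoW]
      · simp only [getTripleGoA]
        rw [if_neg (by simpa using hc)]
        have h1 : getTripleGoW (p :: p :: c :: rest) = getTripleGoW (p :: c :: rest) := by
          simp only [getTripleGoW]
          rw [if_neg]; rintro ⟨-, h⟩; exact hc h.symm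
        rw [h1, goW_drop_head _ (fun h => hc h.symm)]
        exact (ih c).1

-- ===== VERDICT (by name: the statement is the Claim_ definition above) =====
theorem getTriple_spec : Claim_equal_getTriple := by
  intro input _
  unfold Spec_getTriple getTriple getTriple_alt
  rw [goB_eq_goW, List.drop_zero]
  cases h : input.toList with
  | nil => rfl
  | cons c rest =>
    simp only [getTripleGoA]
    rw [if_neg (by simp)]
    exact (goA_eq_goW rest c).1
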